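-- pv_equiv track=rewrite | github.com/eliottcassidy2000/math | 04-computation/omega_perfectness_implications.py | is_perfect_check
-- ===== SOURCE A (Python) =====
-- import itertools
--
-- def is_perfect_check(adj, m):
--     """Check perfectness via Strong Perfect Graph Theorem:
--     G is perfect iff no odd hole of length >= 5 in G or complement(G)."""
--     if m <= 4:
--         return True
--
--     comp_adj = [set() for _ in range(m)]
--     for i in range(m):
--         for j in range(i+1, m):
--             if j not in adj[i]:
--                 comp_adj[i].add(j)
--                 comp_adj[j].add(i)
--
--     for graph in [adj, comp_adj]:
--         for length in range(5, m+1, 2):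
--             for vertices in itertools.combinations(range(m), length):
--                 # Check induced cycle: each vertex has degree exactly 2
--                 ok = True
--                 for v in vertices:
--                     deg = sum(1 for u in vertices if u != v and u in graph[v])
--                     if deg != 2:
--                         ok = False
--                         break
--                 if not ok:
--                     continue
--                 # Check connectivity
--                 visited = {vertices[0]}
--                 stack = [vertices[0]]
--                 while stack:
--                     u = stack.pop()
--                     for w in vertices:
--                         if w not in visited and w in graph[u]:
--                             visited.add(w)
--                             stack.append(w)
--                 if len(visited) == length:
--                     return False
--     return True
-- ===== SOURCE B (Python) =====
-- def is_perfect_check(adj, m):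
--     """Check perfectness via Strong Perfect Graph Theorem:
--     G is perfect iff no odd hole of length >= 5 in G or complement(G)."""
--     if m <= 4:
--         return True
--
--     def in_graph(k, v, u):
--         # k == 0: the graph itself; k == 1: its complement (symmetric pair rule)
--         if k == 0:
--             return u in adj[v]
--         if v == u:
--             return False
--         a, b = (v, u) if v < u else (u, v)
--         return b not in adj[a]
--
--     def is_hole(k, s):
--         n = len(s)
--         if any(sum(1 for u in s if u != v and in_graph(k, v, u)) != 2 for v in s):
--             return False
--         reached = [s[0]]
--         for _ in range(n):
--             reached = reached + [w for w in s
--                                  if w not in reached and any(in_graph(k, u, w) for u in reached)]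
--         return len(reached) == n
--
--     def search(s, nxt):
--         if nxt == m:
--             if len(s) >= 5 and len(s) % 2 == 1 and (is_hole(0, s) or is_hole(1, s)):
--                 return False
--             return True
--         return search(s, nxt + 1) and search(s + [nxt], nxt + 1)
--
--     return search([], 0)
-- ===== Notes on version B (the rewrite author's own statement) =====
-- stated objective: alternative
-- what changed: B replaces the materialized complement and per-length itertools.combinations enumeration with on-the-fly edge predicates and one recursive subset search, and decides connectivity of a candidate subset by round-based frontier expansion instead of an explicit-stack DFS.
import Mathlib
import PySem

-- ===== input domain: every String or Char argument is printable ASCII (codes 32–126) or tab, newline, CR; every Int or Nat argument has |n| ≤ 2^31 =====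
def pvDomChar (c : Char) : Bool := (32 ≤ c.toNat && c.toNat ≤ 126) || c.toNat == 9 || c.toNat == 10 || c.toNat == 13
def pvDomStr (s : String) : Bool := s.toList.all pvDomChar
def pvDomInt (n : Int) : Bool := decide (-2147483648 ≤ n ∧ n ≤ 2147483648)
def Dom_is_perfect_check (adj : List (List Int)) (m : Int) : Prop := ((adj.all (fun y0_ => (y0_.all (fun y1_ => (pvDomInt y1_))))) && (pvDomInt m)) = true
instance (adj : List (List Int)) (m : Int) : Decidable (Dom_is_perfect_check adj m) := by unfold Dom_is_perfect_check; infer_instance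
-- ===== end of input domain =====

-- B replaces the materialized complement and per-length combinations enumeration with on-the-fly
-- edge predicates and one recursive subset search, and decides connectivity of a candidate subset
-- by round-based frontier expansion instead of an explicit-stack DFS (objective: alternative).

-- ===== PORT A =====
def pvRow (g : List (List Int)) (v : Int) : List Int := PySem.List.pyGetD g v []

def pvUpd (c : List (List Int)) (i x : Int) : List (List Int) :=
  c.modify i.toNat (fun s => PySem.Set.add s x)

def pvComp (adj : List (List Int)) (m : Int) : List (List Int) :=
  (PySem.List.pyRange 0 m 1).foldl (fun c i =>
    (PySem.List.pyRange (i+1) m 1).foldl (fun c j =>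
      if !(pvRow adj i).contains j then pvUpd (pvUpd c i j) j i else c) c)
    ((PySem.List.pyRange 0 m 1).map (fun _ => ([] : List Int)))

def pvDegA (g : List (List Int)) (vs : List Int) (v : Int) : Int :=
  vs.foldl (fun acc u => if u ≠ v ∧ (pvRow g v).contains u = true then acc + 1 else acc) 0

def pvDfsA (g : List (List Int)) (vs : List Int) : Nat → List Int → List Int → List Int
  | 0, visited, _ => visited
  | _ + 1, visited, [] => visited
  | fuel + 1, visited, u :: stack =>
    let p := vs.foldl
      (fun (p : List Int × List Int) w =>
        if ¬ w ∈ p.1 ∧ (pvRow g u).contains w = true then (PySem.Set.add p.1 w, w :: p.2) else p)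
      (visited, stack)
    pvDfsA g vs fuel p.1 p.2

def pvHoleA (g : List (List Int)) (vs : List Int) : Bool :=
  (vs.all fun v => pvDegA g vs v == 2) &&
  ((pvDfsA g vs (vs.length + 1) [vs.headD 0] [vs.headD 0]).length == vs.length)

def is_perfect_check (adj : List (List Int)) (m : Int) : Bool :=
  if m ≤ 4 then true
  else if ([adj, pvComp adj m].any fun g =>
      (PySem.List.pyRange 5 (m+1) 2).any fun len =>
        (PySem.List.combinations (PySem.List.pyRange 0 m 1) len.toNat).any fun vs =>
          pvHoleA g vs)
    then false else true

-- ===== PORT B =====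
def pvRowB (g : List (List Int)) (v : Int) : List Int := PySem.List.pyGetD g v []

def pvEdge (adj : List (List Int)) (k v u : Int) : Bool :=
  if k == 0 then (pvRowB adj v).contains u
  else if v == u then false
  else if v < u then !(pvRowB adj v).contains u
  else !(pvRowB adj u).contains v

def pvDegB (adj : List (List Int)) (k : Int) (s : List Int) (v : Int) : Int :=
  (s.countP (fun u => u != v && pvEdge adj k v u) : Nat)

def pvExpand (adj : List (List Int)) (k : Int) (s r : List Int) : List Int :=
  r ++ s.filter (fun w => !r.contains w && r.any (fun u => pvEdge adj k u w))

def pvHoleB (adj : List (List Int)) (k : Int) (s : List Int) : Bool :=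
  if s.any (fun v => pvDegB adj k s v != 2) then false
  else ((List.range s.length).foldl (fun r _ => pvExpand adj k s r) [s.headD 0]).length == s.length

def pvBase (adj : List (List Int)) (s : List Int) : Bool :=
  if 5 ≤ s.length ∧ s.length % 2 = 1 ∧ (pvHoleB adj 0 s || pvHoleB adj 1 s) then false else true

def pvSearch (adj : List (List Int)) : List Int → Nat → Int → Bool
  | s, 0, _ => pvBase adj s
  | s, left + 1, nxt => pvSearch adj s left (nxt + 1) && pvSearch adj (s ++ [nxt]) left (nxt + 1)

def is_perfect_check_alt (adj : List (List Int)) (m : Int) : Bool :=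
  if m ≤ 4 then true else pvSearch adj [] m.toNat 0

-- ===== PRECONDITION & SPEC =====
-- Pre_ excludes exactly the inputs on which Python A raises IndexError: m ≥ 5 with fewer than m rows in adj.
def Pre_is_perfect_check (adj : List (List Int)) (m : Int) : Prop := m ≤ 4 ∨ m ≤ (adj.length : Int)
instance (adj : List (List Int)) (m : Int) : Decidable (Pre_is_perfect_check adj m) := by
  unfold Pre_is_perfect_check; infer_instance

def pvWitness_is_perfect_check : List (List Int) × Int := ([[1,4],[0,2],[1,3],[2,4],[0,3]], 5)

def Spec_is_perfect_check (adj : List (List Int)) (m : Int) (out : Bool) : Prop :=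
  out = is_perfect_check_alt adj m
instance (adj : List (List Int)) (m : Int) (out : Bool) : Decidable (Spec_is_perfect_check adj m out) := by
  unfold Spec_is_perfect_check; infer_instance

-- ===== CLAIM (what is proved, stated in full; the proofs are below) =====
def Claim_equal_is_perfect_check : Prop := ∀ (adj : List (List Int)) (m : Int),
  Dom_is_perfect_check adj m → Pre_is_perfect_check adj m →
  Spec_is_perfect_check adj m (is_perfect_check adj m)

-- ===== LEMMAS AND PROOFS =====

lemma pvRowB_eq (g : List (List Int)) (v : Int) : pvRowB g v = pvRow g v := rfl

-- abstract directed step relation inside a vertex list, and reachability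
def pvStep (e : Int → Int → Bool) (vs : List Int) (u w : Int) : Prop := w ∈ vs ∧ e u w = true
def pvReach (e : Int → Int → Bool) (vs : List Int) (v0 w : Int) : Prop :=
  Relation.ReflTransGen (pvStep e vs) v0 w

lemma pvReach_congr (e1 e2 : Int → Int → Bool) (vs : List Int) (v0 : Int) (hv0 : v0 ∈ vs)
    (h : ∀ u ∈ vs, ∀ w ∈ vs, e1 u w = e2 u w) :
    ∀ x, pvReach e1 vs v0 x ↔ pvReach e2 vs v0 x := by
  have aux : ∀ (f1 f2 : Int → Int → Bool), (∀ u ∈ vs, ∀ w ∈ vs, f1 u w = f2 u w) →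
      ∀ x, pvReach f1 vs v0 x → pvReach f2 vs v0 x ∧ x ∈ vs := by
    intro f1 f2 hf x hx
    induction hx with
    | refl => exact ⟨Relation.ReflTransGen.refl, hv0⟩
    | @tail b c hab hbc ih =>
      obtain ⟨r2, hb⟩ := ih
      obtain ⟨hwvs, he⟩ := hbc
      refine ⟨r2.tail ⟨hwvs, ?_⟩, hwvs⟩
      rw [← hf b hb c hwvs]; exact he
  intro x
  constructor
  · intro hx; exact (aux e1 e2 h x hx).1
  · intro hx
    refine (aux e2 e1 ?_ x hx).1
    intro u hu w hw; exact (h u hu w hw).symm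

-- ---------- DFS (port A) characterization ----------

lemma pvDfs_fold (g : List (List Int)) (u : Int) :
    ∀ (l : List Int) (vis stk : List Int), l.Nodup →
    (l.foldl (fun (p : List Int × List Int) w =>
        if ¬ w ∈ p.1 ∧ (pvRow g u).contains w = true then (PySem.Set.add p.1 w, w :: p.2) else p)
      (vis, stk))
    = (vis ++ l.filter (fun w => !vis.contains w && (pvRow g u).contains w),
       (l.filter (fun w => !vis.contains w && (pvRow g u).contains w)).reverse ++ stk) := by
  intro l
  induction l with
  | nil => intro vis stk _; simp
  | cons a l ih =>
    intro vis stk hnd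
    obtain ⟨hal, hndl⟩ := List.nodup_cons.mp hnd
    simp only [List.foldl_cons]
    by_cases hc : ¬ a ∈ vis ∧ (pvRow g u).contains a = true
    · rw [if_pos hc]
      have hadd : PySem.Set.add vis a = vis ++ [a] := by
        simp [PySem.Set.add, hc.1]
      rw [hadd, ih (vis ++ [a]) (a :: stk) hndl]
      have hfilt : List.filter (fun w => !(vis ++ [a]).contains w && (pvRow g u).contains w) l
          = List.filter (fun w => !vis.contains w && (pvRow g u).contains w) l := by
        apply List.filter_congr
        intro x hx
        have hxa : x ≠ a := fun h => hal (h ▸ hx)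
        simp [List.mem_append, hxa]
      have hpa : (!vis.contains a && (pvRow g u).contains a) = true := by
        have h1 : vis.contains a = false := by simpa using hc.1
        rw [h1, hc.2]; rfl
      rw [hfilt]
      simp only [List.filter_cons, hpa, if_true]
      simp [List.append_assoc]
    · rw [if_neg hc]
      rw [ih vis stk hndl]
      have hpa : (!vis.contains a && (pvRow g u).contains a) = false := by
        rcases not_and_or.mp hc with h | h
        · have h1 : vis.contains a = true := by simpa using not_not.mp h
          rw [h1]; rfl
        · have h2 : (pvRow g u).contains a = false := by
            cases hca : (pvRow g u).contains a
            · rfl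
            · exact absurd hca h
          rw [h2]; simp
      simp only [List.filter_cons, hpa]
      simp

lemma pvDfs_spec (g : List (List Int)) (vs : List Int) (v0 : Int) (hvs : vs.Nodup) :
    ∀ (fuel : Nat) (vis stk : List Int),
    vis.Nodup →
    (∀ x ∈ stk, x ∈ vis) →
    (∀ x ∈ vis, pvReach (fun a b => (pvRow g a).contains b) vs v0 x) →
    (∀ u ∈ vis, u ∉ stk → ∀ w ∈ vs, (pvRow g u).contains w = true → w ∈ vis) →
    stk.length + (vs.filter (fun x => !vis.contains x)).length ≤ fuel →
    (pvDfsA g vs fuel vis stk).Nodup ∧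
    (∀ x ∈ vis, x ∈ pvDfsA g vs fuel vis stk) ∧
    (∀ x ∈ pvDfsA g vs fuel vis stk, pvReach (fun a b => (pvRow g a).contains b) vs v0 x) ∧
    (∀ u ∈ pvDfsA g vs fuel vis stk, ∀ w ∈ vs, (pvRow g u).contains w = true →
        w ∈ pvDfsA g vs fuel vis stk) := by
  intro fuel
  induction fuel with
  | zero =>
    intro vis stk hnd hsub hreach hclosed hfuel
    have hstk : stk = [] := List.length_eq_zero_iff.mp (by omega)
    subst hstk
    refine ⟨hnd, fun x hx => hx, hreach, ?_⟩
    intro u hu w hw hcw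
    exact hclosed u hu (by simp) w hw hcw
  | succ fuel ih =>
    intro vis stk hnd hsub hreach hclosed hfuel
    cases stk with
    | nil =>
      refine ⟨hnd, fun x hx => hx, hreach, ?_⟩
      intro u hu w hw hcw
      exact hclosed u hu (by simp) w hw hcw
    | cons u stk =>
      have hu_vis : u ∈ vis := hsub u (List.mem_cons_self)
      set new := vs.filter (fun w => !vis.contains w && (pvRow g u).contains w) with hnewdef
      have hnewmem : ∀ x, x ∈ new ↔ (x ∈ vs ∧ x ∉ vis ∧ (pvRow g u).contains x = true) := by
        intro x
        simp [hnewdef, List.mem_filter]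
      have hstep : pvDfsA g vs (fuel + 1) vis (u :: stk)
          = pvDfsA g vs fuel (vis ++ new) (new.reverse ++ stk) := by
        conv_lhs => rw [pvDfsA]
        rw [pvDfs_fold g u vs vis stk hvs]
      rw [hstep]
      have hnd' : (vis ++ new).Nodup := by
        rw [List.nodup_append]
        exact ⟨hnd, hvs.filter _, fun a ha b hb hab => ((hnewmem b).mp hb).2.1 (hab ▸ ha)⟩
      have hsub' : ∀ x ∈ new.reverse ++ stk, x ∈ vis ++ new := by
        intro x hx
        rcases List.mem_append.mp hx with hx | hx
        · exact List.mem_append.mpr (Or.inr (List.mem_reverse.mp hx))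
        · exact List.mem_append.mpr (Or.inl (hsub x (List.mem_cons_of_mem _ hx)))
      have hreach' : ∀ x ∈ vis ++ new, pvReach (fun a b => (pvRow g a).contains b) vs v0 x := by
        intro x hx
        rcases List.mem_append.mp hx with hx | hx
        · exact hreach x hx
        · obtain ⟨hxvs, _, hxe⟩ := (hnewmem x).mp hx
          exact (hreach u hu_vis).tail ⟨hxvs, hxe⟩
      have hclosed' : ∀ a ∈ vis ++ new, a ∉ new.reverse ++ stk →
          ∀ w ∈ vs, (pvRow g a).contains w = true → w ∈ vis ++ new := by
        intro a ha hanstk w hwvs hcw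
        rcases List.mem_append.mp ha with havis | hanew
        · by_cases hau : a = u
          · subst hau
            by_cases hwvis : w ∈ vis
            · exact List.mem_append.mpr (Or.inl hwvis)
            · exact List.mem_append.mpr (Or.inr ((hnewmem w).mpr ⟨hwvs, hwvis, hcw⟩))
          · have hastk : a ∉ stk := fun h => hanstk (List.mem_append.mpr (Or.inr h))
            have : a ∉ u :: stk := by simp [hau, hastk]
            exact List.mem_append.mpr (Or.inl (hclosed a havis this w hwvs hcw))
        · exact absurd (List.mem_append.mpr (Or.inl (List.mem_reverse.mpr hanew))) hanstk
      have hfuel' : (new.reverse ++ stk).length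
          + (vs.filter (fun x => !(vis ++ new).contains x)).length ≤ fuel := by
        have key1 : new = (vs.filter (fun x => !vis.contains x)).filter
            (fun w => (pvRow g u).contains w) := by
          rw [List.filter_filter]
          apply List.filter_congr
          intro x _
          rw [Bool.and_comm]
        have key2 : vs.filter (fun x => !(vis ++ new).contains x)
            = (vs.filter (fun x => !vis.contains x)).filter
                (fun w => !(pvRow g u).contains w) := by
          have step1 : vs.filter (fun x => !(vis ++ new).contains x)
              = (vs.filter (fun x => !vis.contains x)).filter (fun x => !new.contains x) := by
            rw [List.filter_filter]
            apply List.filter_congr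
            intro x _
            have hca : (vis ++ new).contains x = (vis.contains x || new.contains x) := by
              simp [List.mem_append]
            rw [hca, Bool.not_or, Bool.and_comm]
          rw [step1]
          apply List.filter_congr
          intro x hx
          have hxp := List.mem_filter.mp hx
          have hxvs : x ∈ vs := hxp.1
          have hxnvis : x ∉ vis := by simpa using hxp.2
          by_cases hxe : (pvRow g u).contains x = true
          · have hxn : new.contains x = true := by
              simpa using (hnewmem x).mpr ⟨hxvs, hxnvis, hxe⟩
            rw [hxn, hxe]
          · have hxe' : (pvRow g u).contains x = false := by
              cases h : (pvRow g u).contains x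
              · rfl
              · exact absurd h hxe
            have hxn : new.contains x = false := by
              have : x ∉ new := fun h => hxe ((hnewmem x).mp h).2.2
              simpa using this
            rw [hxn, hxe']
        have key3 : ((vs.filter (fun x => !vis.contains x)).filter
                (fun w => (pvRow g u).contains w)).length
            + ((vs.filter (fun x => !vis.contains x)).filter
                (fun w => !(pvRow g u).contains w)).length
            = (vs.filter (fun x => !vis.contains x)).length := by
          exact (List.length_eq_length_filter_add _).symm
        have hlen1 : (new.reverse ++ stk).length = new.length + stk.length := by
          simp
        have hlen2 : new.length ≤ (vs.filter (fun x => !vis.contains x)).length := by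
          rw [key1]; exact List.length_filter_le _ _
        rw [hlen1, key2]
        have hold : (u :: stk).length = stk.length + 1 := by simp
        rw [hold] at hfuel
        have := key3
        rw [← key1] at this
        omega
      obtain ⟨c1, c2, c3, c4⟩ := ih (vis ++ new) (new.reverse ++ stk) hnd' hsub' hreach' hclosed' hfuel'
      exact ⟨c1, fun x hx => c2 x (List.mem_append.mpr (Or.inl hx)), c3, c4⟩

lemma pvDfs_char (g : List (List Int)) (vs : List Int) (v0 : Int) (hvs : vs.Nodup) (hv0 : v0 ∈ vs) :
    (pvDfsA g vs (vs.length + 1) [v0] [v0]).Nodup ∧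
    (∀ x, x ∈ pvDfsA g vs (vs.length + 1) [v0] [v0] ↔
        pvReach (fun a b => (pvRow g a).contains b) vs v0 x) := by
  obtain ⟨c1, c2, c3, c4⟩ := pvDfs_spec g vs v0 hvs (vs.length + 1) [v0] [v0]
    (by simp)
    (by intro x hx; exact hx)
    (by
      intro x hx
      have hx0 : x = v0 := by simpa using hx
      subst hx0; exact Relation.ReflTransGen.refl)
    (by
      intro u hu hnstk
      exact absurd hu hnstk)
    (by
      have := List.length_filter_le (fun x => !(([v0] : List Int)).contains x) vs
      simp only [List.length_cons, List.length_nil]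
      omega)
  refine ⟨c1, fun x => ⟨c3 x, ?_⟩⟩
  intro hr
  have hr' : Relation.ReflTransGen (pvStep (fun a b => (pvRow g a).contains b) vs) v0 x := hr
  induction hr' with
  | refl => exact c2 v0 (by simp)
  | tail hab hbc ih => exact c4 _ (ih hab) _ hbc.1 hbc.2

-- ---------- frontier expansion (port B) characterization ----------

lemma pvExpand_char (adj : List (List Int)) (k : Int) (s : List Int) (v0 : Int)
    (hs : s.Nodup) (hv0 : v0 ∈ s) :
    ((List.range s.length).foldl (fun r _ => pvExpand adj k s r) [v0]).Nodup ∧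
    (∀ x, x ∈ (List.range s.length).foldl (fun r _ => pvExpand adj k s r) [v0] ↔
        pvReach (pvEdge adj k) s v0 x) := by
  set iter := fun t => (List.range t).foldl (fun r _ => pvExpand adj k s r) [v0] with hiter
  have hiter_succ : ∀ t, iter (t + 1) = pvExpand adj k s (iter t) := by
    intro t
    simp [hiter, List.range_succ]
  have hiter0 : iter 0 = [v0] := rfl
  have hProps : ∀ t, (iter t).Nodup ∧ (∀ x ∈ iter t, x ∈ s) ∧
      (∀ x ∈ iter t, pvReach (pvEdge adj k) s v0 x) := by
    intro t
    induction t with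
    | zero =>
      rw [hiter0]
      refine ⟨by simp, ?_, ?_⟩
      · intro x hx
        have : x = v0 := by simpa using hx
        subst this; exact hv0
      · intro x hx
        have : x = v0 := by simpa using hx
        subst this; exact Relation.ReflTransGen.refl
    | succ t ih =>
      obtain ⟨ihnd, ihsub, ihreach⟩ := ih
      rw [hiter_succ]
      unfold pvExpand
      refine ⟨?_, ?_, ?_⟩
      · rw [List.nodup_append]
        refine ⟨ihnd, hs.filter _, ?_⟩
        intro a ha b hb hab
        have hb' := List.mem_filter.mp hb
        have h2 := hb'.2
        simp only [Bool.and_eq_true, Bool.not_eq_true'] at h2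
        have hnb : b ∉ iter t := by simpa using h2.1
        exact hnb (hab ▸ ha)
      · intro x hx
        rcases List.mem_append.mp hx with hx | hx
        · exact ihsub x hx
        · exact (List.mem_filter.mp hx).1
      · intro x hx
        rcases List.mem_append.mp hx with hx | hx
        · exact ihreach x hx
        · have hx' := List.mem_filter.mp hx
          have hx2 := hx'.2
          simp only [Bool.and_eq_true, List.any_eq_true] at hx2
          obtain ⟨u, hu, hue⟩ := hx2.2
          exact (ihreach u hu).tail ⟨hx'.1, hue⟩
  have hstab : ∀ t, pvExpand adj k s (iter t) = iter t → ∀ d, iter (t + d) = iter t := by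
    intro t h d
    induction d with
    | zero => rfl
    | succ d ihd =>
      have : t + (d + 1) = (t + d) + 1 := rfl
      rw [this, hiter_succ, ihd, h]
  have hclosed_of_stab : ∀ r, pvExpand adj k s r = r →
      ∀ u ∈ r, ∀ w ∈ s, pvEdge adj k u w = true → w ∈ r := by
    intro r h u hu w hw he
    by_contra hwr
    have hf : s.filter (fun w => !r.contains w && r.any (fun u => pvEdge adj k u w)) = [] := by
      have h' := h
      unfold pvExpand at h'
      exact List.append_right_eq_self.mp h'
    rw [List.filter_eq_nil_iff] at hf
    apply hf w hw
    have h1 : r.contains w = false := by simpa using hwr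
    have h2 : r.any (fun u => pvEdge adj k u w) = true := List.any_eq_true.mpr ⟨u, hu, he⟩
    simp [hwr, h2]
  have hsize : ∀ t, (iter t).length ≤ s.length := by
    intro t
    obtain ⟨hnd, hsub, _⟩ := hProps t
    classical
    calc (iter t).length = (iter t).toFinset.card := (List.toFinset_card_of_nodup hnd).symm
      _ ≤ s.toFinset.card := by
          apply Finset.card_le_card
          intro x hx
          rw [List.mem_toFinset] at *
          exact hsub x hx
      _ ≤ s.length := s.toFinset_card_le
  have hC : ∀ t, pvExpand adj k s (iter t) = iter t ∨ t + 1 ≤ (iter t).length := by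
    intro t
    induction t with
    | zero =>
      right
      rw [hiter0]
      simp
    | succ t ih =>
      rcases ih with h | h
      · left
        have h1 : iter (t + 1) = iter t := by rw [hiter_succ, h]
        rw [h1]; exact h
      · by_cases hx : pvExpand adj k s (iter t) = iter t
        · left
          have h1 : iter (t + 1) = iter t := by rw [hiter_succ, hx]
          rw [h1]; exact hx
        · right
          have hne : s.filter (fun w => !(iter t).contains w
              && (iter t).any (fun u => pvEdge adj k u w)) ≠ [] := by
            intro hnil
            apply hx
            unfold pvExpand
            rw [hnil, List.append_nil]
          have hpos := List.length_pos_iff.mpr hne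
          have h1 : (iter (t + 1)).length = (iter t).length
              + (s.filter (fun w => !(iter t).contains w
                  && (iter t).any (fun u => pvEdge adj k u w))).length := by
            rw [hiter_succ]
            unfold pvExpand
            simp
          omega
  have hclosedn : ∀ u ∈ iter s.length, ∀ w ∈ s, pvEdge adj k u w = true → w ∈ iter s.length := by
    rcases hC s.length with h | h
    · exact hclosed_of_stab _ h
    · have := hsize s.length
      omega
  have hv0n : ∀ t, v0 ∈ iter t := by
    intro t
    induction t with
    | zero => rw [hiter0]; simp
    | succ t ih =>
      rw [hiter_succ]
      unfold pvExpand
      exact List.mem_append.mpr (Or.inl ih)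
  refine ⟨(hProps s.length).1, fun x => ⟨(hProps s.length).2.2 x, ?_⟩⟩
  intro hr
  have hr' : Relation.ReflTransGen (pvStep (pvEdge adj k) s) v0 x := hr
  induction hr' with
  | refl => exact hv0n s.length
  | tail hab hbc ih => exact hclosedn _ (ih hab) _ hbc.1 hbc.2

-- ---------- per-subset check equality ----------

lemma pvHole_eq (adj : List (List Int)) (k : Int) (g : List (List Int)) (vs : List Int)
    (hvs : vs.Nodup) (hlen : 5 ≤ vs.length)
    (hedge : ∀ v ∈ vs, ∀ u ∈ vs, (pvRow g v).contains u = pvEdge adj k v u) :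
    pvHoleA g vs = pvHoleB adj k vs := by
  have hv0 : vs.headD 0 ∈ vs := by
    cases vs with
    | nil => simp at hlen
    | cons a l => simp
  have hdeg : ∀ v ∈ vs, pvDegA g vs v = pvDegB adj k vs v := by
    intro v hv
    unfold pvDegA pvDegB
    rw [PySem.List.foldl_ite_add_one]
    rw [List.countP_congr (q := fun u => u != v && pvEdge adj k v u) ?_]
    · omega
    · intro u hu
      constructor
      · intro h
        have h' := of_decide_eq_true h
        simp only [Bool.and_eq_true, bne_iff_ne]
        exact ⟨h'.1, (hedge v hv u hu) ▸ h'.2⟩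
      · intro h
        simp only [Bool.and_eq_true, bne_iff_ne] at h
        exact decide_eq_true ⟨h.1, (hedge v hv u hu) ▸ h.2⟩
  have hconn : ((pvDfsA g vs (vs.length + 1) [vs.headD 0] [vs.headD 0]).length == vs.length)
      = (((List.range vs.length).foldl (fun r _ => pvExpand adj k vs r) [vs.headD 0]).length
          == vs.length) := by
    obtain ⟨nd1, mem1⟩ := pvDfs_char g vs (vs.headD 0) hvs hv0
    obtain ⟨nd2, mem2⟩ := pvExpand_char adj k vs (vs.headD 0) hvs hv0
    have hmemeq : ∀ x, x ∈ pvDfsA g vs (vs.length + 1) [vs.headD 0] [vs.headD 0] ↔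
        x ∈ (List.range vs.length).foldl (fun r _ => pvExpand adj k vs r) [vs.headD 0] := by
      intro x
      rw [mem1 x, mem2 x]
      exact pvReach_congr _ _ vs (vs.headD 0) hv0 hedge x
    have hperm := (List.perm_ext_iff_of_nodup nd1 nd2).mpr hmemeq
    rw [hperm.length_eq]
  by_cases hall : (vs.all fun v => pvDegA g vs v == 2) = true
  · have hany : (vs.any fun v => pvDegB adj k vs v != 2) = false := by
      rw [List.any_eq_false]
      intro v hv
      have h2 : pvDegA g vs v = 2 := by
        have := List.all_eq_true.mp hall v hv
        exact_mod_cast of_decide_eq_true this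
      rw [← hdeg v hv, h2]
      simp
    unfold pvHoleA pvHoleB
    rw [hall, hany]
    simp only [Bool.false_eq_true, if_false, Bool.true_and]
    exact hconn
  · have hall' : (vs.all fun v => pvDegA g vs v == 2) = false := by
      cases h : (vs.all fun v => pvDegA g vs v == 2)
      · rfl
      · exact absurd h hall
    have hany : (vs.any fun v => pvDegB adj k vs v != 2) = true := by
      rw [List.all_eq_false] at hall'
      obtain ⟨v, hv, hne⟩ := hall'
      rw [List.any_eq_true]
      refine ⟨v, hv, ?_⟩
      rw [← hdeg v hv]
      simpa using hne
    unfold pvHoleA pvHoleB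
    rw [hall', hany]
    simp

-- ---------- complement characterization ----------

lemma pvRow_eq_getD (c : List (List Int)) (v : Int) (hv : 0 ≤ v) :
    pvRow c v = c.getD v.toNat [] := by
  by_cases h : v < (c.length : Int)
  · rw [pvRow, PySem.List.pyGetD_eq_getElem c [] hv h]
    rw [List.getD_eq_getElem?_getD, List.getElem?_eq_getElem (by omega)]
    rfl
  · rw [pvRow, PySem.List.pyGetD, PySem.List.pyGet?, PySem.List.pyIdx?]
    rw [if_pos hv, if_neg (by omega)]
    rw [List.getD_eq_default _ _ (by omega)]
    rfl

lemma pvRow_modify (c : List (List Int)) (n : Nat) (f : List Int → List Int) (v : Int) (hv : 0 ≤ v) :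
    pvRow (c.modify n f) v
      = if v.toNat = n ∧ v < (c.length : Int) then f (pvRow c v) else pvRow c v := by
  rw [pvRow_eq_getD _ _ hv, pvRow_eq_getD _ _ hv]
  by_cases h : v < (c.length : Int)
  · rw [List.getD_eq_getElem?_getD, List.getD_eq_getElem?_getD, List.getElem?_modify]
    rw [List.getElem?_eq_getElem (l := c) (by omega)]
    by_cases he : v.toNat = n
    · simp [he, h]
    · rw [if_neg (by intro hn; exact he hn.1)]
      have hne : ¬ n = v.toNat := fun h' => he h'.symm
      simp [hne]
  · have h1 : (c.modify n f).length ≤ v.toNat := by rw [List.length_modify]; omega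
    rw [List.getD_eq_default _ _ h1, List.getD_eq_default _ _ (by omega)]
    simp [h]

lemma pvRow_upd (c : List (List Int)) (i x v : Int) (hi : 0 ≤ i) (hv : 0 ≤ v) :
    pvRow (pvUpd c i x) v =
      if v = i ∧ v < (c.length : Int) then PySem.Set.add (pvRow c v) x else pvRow c v := by
  rw [pvUpd, pvRow_modify c i.toNat _ v hv]
  by_cases hcond : v = i ∧ v < (c.length : Int)
  · rw [if_pos ⟨by omega, hcond.2⟩, if_pos hcond]
  · rw [if_neg ?_, if_neg hcond]
    intro h1
    exact hcond ⟨by omega, h1.2⟩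

lemma pvContains_add (s : List Int) (x y : Int) :
    (List.contains (PySem.Set.add s x) y = true) ↔ (List.contains s y = true ∨ y = x) := by
  simp [PySem.Set.mem_add]

lemma pvCompInner (adj : List (List Int)) (m i : Int) (hi : 0 ≤ i) (him : i < m) :
    ∀ (n : Nat) (a : Int), i < a → (m - a).toNat = n →
    ∀ (c : List (List Int)) (P : Int → Int → Prop), c.length = m.toNat →
    (∀ v u, 0 ≤ v → ((pvRow c v).contains u = true ↔ P v u)) →
    ((PySem.List.pyRange a m 1).foldl (fun c j =>
        if !(pvRow adj i).contains j then pvUpd (pvUpd c i j) j i else c) c).length = m.toNat ∧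
    (∀ v u, 0 ≤ v → ((pvRow ((PySem.List.pyRange a m 1).foldl (fun c j =>
        if !(pvRow adj i).contains j then pvUpd (pvUpd c i j) j i else c) c) v).contains u = true ↔
        (P v u ∨ (v = i ∧ a ≤ u ∧ u < m ∧ (pvRow adj i).contains u = false)
               ∨ (u = i ∧ a ≤ v ∧ v < m ∧ (pvRow adj i).contains v = false)))) := by
  intro n
  induction n with
  | zero =>
    intro a ha hn c P hlen hP
    rw [PySem.List.pyRange_one_eq_nil (by omega)]
    simp only [List.foldl_nil]
    refine ⟨hlen, ?_⟩
    intro v u hv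
    rw [hP v u hv]
    constructor
    · exact Or.inl
    · rintro (h | ⟨_, h1, h2, _⟩ | ⟨_, h1, h2, _⟩)
      · exact h
      · omega
      · omega
  | succ n ih =>
    intro a ha hn c P hlen hP
    have ham : a < m := by omega
    have hm0 : 0 ≤ m := by omega
    have hmc : (m.toNat : Int) = m := by omega
    rw [PySem.List.pyRange_one_cons ham, List.foldl_cons]
    by_cases hea : (pvRow adj i).contains a = true
    · have hbody : (if !(pvRow adj i).contains a then pvUpd (pvUpd c i a) a i else c) = c := by
        rw [hea]; rfl
      rw [hbody]
      obtain ⟨l1, l2⟩ := ih (a + 1) (by omega) (by omega) c P hlen hP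
      refine ⟨l1, ?_⟩
      intro v u hv
      rw [l2 v u hv]
      constructor
      · rintro (h | ⟨h1, h2, h3, h4⟩ | ⟨h1, h2, h3, h4⟩)
        · exact Or.inl h
        · exact Or.inr (Or.inl ⟨h1, by omega, h3, h4⟩)
        · exact Or.inr (Or.inr ⟨h1, by omega, h3, h4⟩)
      · rintro (h | ⟨h1, h2, h3, h4⟩ | ⟨h1, h2, h3, h4⟩)
        · exact Or.inl h
        · rcases (by omega : a + 1 ≤ u ∨ u = a) with h5 | h5
          · exact Or.inr (Or.inl ⟨h1, h5, h3, h4⟩)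
          · rw [h5, hea] at h4; exact absurd h4 (by simp)
        · rcases (by omega : a + 1 ≤ v ∨ v = a) with h5 | h5
          · exact Or.inr (Or.inr ⟨h1, h5, h3, h4⟩)
          · rw [h5, hea] at h4; exact absurd h4 (by simp)
    · have hea' : (pvRow adj i).contains a = false := by
        cases h : (pvRow adj i).contains a
        · rfl
        · exact absurd h hea
      have hbody : (if !(pvRow adj i).contains a then pvUpd (pvUpd c i a) a i else c)
          = pvUpd (pvUpd c i a) a i := by
        rw [hea']; rfl
      rw [hbody]
      have hia : i ≠ a := by omega
      have hlen0 : (pvUpd c i a).length = c.length := by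
        rw [pvUpd, List.length_modify]
      have hlen1 : (pvUpd (pvUpd c i a) a i).length = m.toNat := by
        rw [pvUpd, List.length_modify, hlen0, hlen]
      have hP1 : ∀ v u, 0 ≤ v → ((pvRow (pvUpd (pvUpd c i a) a i) v).contains u = true ↔
          (P v u ∨ (v = i ∧ u = a) ∨ (v = a ∧ u = i))) := by
        intro v u hv
        rw [pvRow_upd (pvUpd c i a) a i v (by omega) hv]
        rw [hlen0, hlen, hmc]
        by_cases hva : v = a
        · rw [if_pos ⟨hva, by omega⟩]
          rw [pvRow_upd c i a v hi hv, if_neg (by intro h1; exact hia (h1.1 ▸ hva.symm ▸ rfl))]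
          rw [pvContains_add, hP v u hv]
          subst hva
          constructor
          · rintro (h | h)
            · exact Or.inl h
            · exact Or.inr (Or.inr ⟨rfl, h⟩)
          · rintro (h | ⟨h1, h2⟩ | ⟨h1, h2⟩)
            · exact Or.inl h
            · omega
            · exact Or.inr h2
        · rw [if_neg (by intro h1; exact hva h1.1)]
          rw [pvRow_upd c i a v hi hv]
          by_cases hvi : v = i
          · rw [if_pos ⟨hvi, by rw [hlen, hmc]; omega⟩]
            rw [pvContains_add, hP v u hv]
            subst hvi
            constructor
            · rintro (h | h)
              · exact Or.inl h
              · exact Or.inr (Or.inl ⟨rfl, h⟩)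
            · rintro (h | ⟨h1, h2⟩ | ⟨h1, h2⟩)
              · exact Or.inl h
              · exact Or.inr h2
              · omega
          · rw [if_neg (by intro h1; exact hvi h1.1)]
            rw [hP v u hv]
            constructor
            · exact Or.inl
            · rintro (h | ⟨h1, h2⟩ | ⟨h1, h2⟩)
              · exact h
              · omega
              · omega
      obtain ⟨l1, l2⟩ := ih (a + 1) (by omega) (by omega) (pvUpd (pvUpd c i a) a i)
        (fun v u => P v u ∨ (v = i ∧ u = a) ∨ (v = a ∧ u = i)) hlen1 hP1
      refine ⟨l1, ?_⟩
      intro v u hv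
      rw [l2 v u hv]
      constructor
      · rintro ((h | ⟨h1, h2⟩ | ⟨h1, h2⟩) | ⟨h1, h2, h3, h4⟩ | ⟨h1, h2, h3, h4⟩)
        · exact Or.inl h
        · exact Or.inr (Or.inl ⟨h1, by omega, by omega, h2 ▸ hea'⟩)
        · exact Or.inr (Or.inr ⟨h2, by omega, by omega, h1 ▸ hea'⟩)
        · exact Or.inr (Or.inl ⟨h1, by omega, h3, h4⟩)
        · exact Or.inr (Or.inr ⟨h1, by omega, h3, h4⟩)
      · rintro (h | ⟨h1, h2, h3, h4⟩ | ⟨h1, h2, h3, h4⟩)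
        · exact Or.inl (Or.inl h)
        · rcases (by omega : a + 1 ≤ u ∨ u = a) with h5 | h5
          · exact Or.inr (Or.inl ⟨h1, h5, h3, h4⟩)
          · exact Or.inl (Or.inr (Or.inl ⟨h1, h5⟩))
        · rcases (by omega : a + 1 ≤ v ∨ v = a) with h5 | h5
          · exact Or.inr (Or.inr ⟨h1, h5, h3, h4⟩)
          · exact Or.inl (Or.inr (Or.inr ⟨h5, h1⟩))

lemma pvCompOuter (adj : List (List Int)) (m : Int) :
    ∀ (n : Nat) (b : Int), 0 ≤ b → (m - b).toNat = n →
    ∀ (c : List (List Int)), c.length = m.toNat →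
    (∀ v u, 0 ≤ v → ((pvRow c v).contains u = true ↔
        ((0 ≤ v ∧ v < u ∧ u < m ∧ v < b ∧ (pvRow adj v).contains u = false) ∨
         (0 ≤ u ∧ u < v ∧ v < m ∧ u < b ∧ (pvRow adj u).contains v = false)))) →
    (∀ v u, 0 ≤ v → ((pvRow ((PySem.List.pyRange b m 1).foldl (fun c i =>
        (PySem.List.pyRange (i+1) m 1).foldl (fun c j =>
          if !(pvRow adj i).contains j then pvUpd (pvUpd c i j) j i else c) c) c) v).contains u = true ↔
        ((0 ≤ v ∧ v < u ∧ u < m ∧ (pvRow adj v).contains u = false) ∨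
         (0 ≤ u ∧ u < v ∧ v < m ∧ (pvRow adj u).contains v = false)))) := by
  intro n
  induction n with
  | zero =>
    intro b hb hn c hlen hP
    rw [PySem.List.pyRange_one_eq_nil (by omega)]
    simp only [List.foldl_nil]
    intro v u hv
    rw [hP v u hv]
    constructor
    · rintro (⟨h1, h2, h3, h4, h5⟩ | ⟨h1, h2, h3, h4, h5⟩)
      · exact Or.inl ⟨h1, h2, h3, h5⟩
      · exact Or.inr ⟨h1, h2, h3, h5⟩
    · rintro (⟨h1, h2, h3, h5⟩ | ⟨h1, h2, h3, h5⟩)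
      · exact Or.inl ⟨h1, h2, h3, by omega, h5⟩
      · exact Or.inr ⟨h1, h2, h3, by omega, h5⟩
  | succ n ih =>
    intro b hb hn c hlen hP
    have hbm : b < m := by omega
    rw [PySem.List.pyRange_one_cons hbm, List.foldl_cons]
    obtain ⟨l1, l2⟩ := pvCompInner adj m b hb hbm ((m - (b+1)).toNat) (b+1) (by omega) rfl c
      (fun v u => ((0 ≤ v ∧ v < u ∧ u < m ∧ v < b ∧ (pvRow adj v).contains u = false) ∨
         (0 ≤ u ∧ u < v ∧ v < m ∧ u < b ∧ (pvRow adj u).contains v = false))) hlen hP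
    apply ih (b + 1) (by omega) (by omega) _ l1
    intro v u hv
    rw [l2 v u hv]
    constructor
    · rintro ((⟨h1, h2, h3, h4, h5⟩ | ⟨h1, h2, h3, h4, h5⟩) | ⟨h1, h2, h3, h4⟩ | ⟨h1, h2, h3, h4⟩)
      · exact Or.inl ⟨h1, h2, h3, by omega, h5⟩
      · exact Or.inr ⟨h1, h2, h3, by omega, h5⟩
      · exact Or.inl ⟨by omega, by omega, h3, by omega, h1 ▸ h4⟩
      · exact Or.inr ⟨by omega, by omega, h3, by omega, h1 ▸ h4⟩
    · rintro (⟨h1, h2, h3, h4, h5⟩ | ⟨h1, h2, h3, h4, h5⟩)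
      · rcases (by omega : v < b ∨ v = b) with h6 | h6
        · exact Or.inl (Or.inl ⟨h1, h2, h3, h6, h5⟩)
        · exact Or.inr (Or.inl ⟨h6, by omega, h3, h6 ▸ h5⟩)
      · rcases (by omega : u < b ∨ u = b) with h6 | h6
        · exact Or.inl (Or.inr ⟨h1, h2, h3, h6, h5⟩)
        · exact Or.inr (Or.inr ⟨h6, by omega, h3, h6 ▸ h5⟩)

lemma pvComp_char (adj : List (List Int)) (m : Int) (hm : 0 ≤ m) :
    ∀ v u : Int, 0 ≤ v →
      ((pvRow (pvComp adj m) v).contains u = true ↔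
        ((0 ≤ v ∧ v < u ∧ u < m ∧ (pvRow adj v).contains u = false) ∨
         (0 ≤ u ∧ u < v ∧ v < m ∧ (pvRow adj u).contains v = false))) := by
  have hinit_len : ((PySem.List.pyRange 0 m 1).map (fun _ => ([] : List Int))).length = m.toNat := by
    rw [List.length_map, PySem.List.length_pyRange_one]
    omega
  have hinit_row : ∀ v : Int, 0 ≤ v →
      pvRow ((PySem.List.pyRange 0 m 1).map (fun _ => ([] : List Int))) v = [] := by
    intro v hv
    rw [pvRow_eq_getD _ _ hv]
    by_cases h : v.toNat < ((PySem.List.pyRange 0 m 1).map (fun _ => ([] : List Int))).length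
    · rw [List.getD_eq_getElem?_getD, List.getElem?_eq_getElem h]
      simp
    · rw [List.getD_eq_default _ _ (by omega)]
  unfold pvComp
  exact pvCompOuter adj m (m - 0).toNat 0 (by omega) rfl _ hinit_len
    (by
      intro v u hv
      rw [hinit_row v hv]
      constructor
      · intro h; simp at h
      · rintro (⟨h1, h2, h3, h4, h5⟩ | ⟨h1, h2, h3, h4, h5⟩) <;> omega)

lemma pvCompEdge (adj : List (List Int)) (m : Int) (hm : 0 ≤ m) (v u : Int)
    (hv : 0 ≤ v ∧ v < m) (hu : 0 ≤ u ∧ u < m) :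
    (pvRow (pvComp adj m) v).contains u = pvEdge adj 1 v u := by
  apply Bool.coe_iff_coe.mp
  rw [pvComp_char adj m hm v u hv.1]
  unfold pvEdge
  simp only [pvRowB_eq]
  by_cases hvu : v = u
  · subst hvu
    simp only [if_neg (by decide : ¬((1 : Int) == 0) = true), if_pos (by simp : (v == v) = true)]
    constructor
    · rintro (⟨_, h2, _, _⟩ | ⟨_, h2, _, _⟩) <;> omega
    · intro h; simp at h
  · rw [if_neg (by decide), if_neg (by simpa using hvu)]
    by_cases hlt : v < u
    · rw [if_pos hlt]
      constructor
      · rintro (⟨_, _, _, h4⟩ | ⟨_, h2, _, _⟩)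
        · rw [h4]; rfl
        · omega
      · intro h
        have h4 : (pvRow adj v).contains u = false := by
          cases hc : (pvRow adj v).contains u
          · rfl
          · rw [hc] at h; simp at h
        exact Or.inl ⟨hv.1, hlt, hu.2, h4⟩
    · rw [if_neg hlt]
      constructor
      · rintro (⟨_, h2, _, _⟩ | ⟨_, _, _, h4⟩)
        · omega
        · rw [h4]; rfl
      · intro h
        have h4 : (pvRow adj u).contains v = false := by
          cases hc : (pvRow adj u).contains v
          · rfl
          · rw [hc] at h; simp at h
        exact Or.inr ⟨hu.1, by omega, hv.2, h4⟩

-- ---------- subset enumeration exchange ----------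

def pvIntRange (a : Int) : Nat → List Int
  | 0 => []
  | n + 1 => a :: pvIntRange (a + 1) n

lemma pvIntRange_eq (n : Nat) : ∀ a : Int, pvIntRange a n = PySem.List.pyRange a (a + n) 1 := by
  induction n with
  | zero =>
    intro a
    simp [pvIntRange, PySem.List.pyRange_one_eq_nil]
  | succ n ih =>
    intro a
    have h1 : a < a + (n + 1 : Nat) := by push_cast; omega
    rw [PySem.List.pyRange_one_cons h1]
    have h2 : a + (n + 1 : Nat) = (a + 1) + (n : Nat) := by push_cast; omega
    simp only [pvIntRange, ih (a + 1), h2]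

lemma pvSearch_eq (adj : List (List Int)) :
    ∀ (left : Nat) (s : List Int) (nxt : Int),
    pvSearch adj s left nxt = (pvIntRange nxt left).sublists'.all (fun e => pvBase adj (s ++ e)) := by
  intro left
  induction left with
  | zero => intro s nxt; simp [pvSearch, pvIntRange]
  | succ n ih =>
    intro s nxt
    show (pvSearch adj s n (nxt + 1) && pvSearch adj (s ++ [nxt]) n (nxt + 1)) = _
    rw [ih s (nxt + 1), ih (s ++ [nxt]) (nxt + 1)]
    show _ = ((nxt :: pvIntRange (nxt + 1) n).sublists').all _
    rw [List.sublists'_cons, List.all_append, List.all_map]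
    simp [Function.comp_def, List.append_assoc]

lemma pv_main (adj : List (List Int)) (m : Int) :
    is_perfect_check adj m = is_perfect_check_alt adj m := by
  unfold is_perfect_check is_perfect_check_alt
  by_cases hm : m ≤ 4
  · rw [if_pos hm, if_pos hm]
  · rw [if_neg hm, if_neg hm]
    have hm0 : (0:Int) ≤ m := by omega
    have hbounds : ∀ v ∈ PySem.List.pyRange 0 m 1, 0 ≤ v ∧ v < m := by
      intro v hv
      have h := PySem.List.mem_pyRange_one.mp hv
      omega
    have hrangend : (PySem.List.pyRange 0 m 1).Nodup := PySem.List.nodup_pyRange_one 0 m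
    have holeAB : ∀ vs, vs.Sublist (PySem.List.pyRange 0 m 1) → 5 ≤ vs.length →
        pvHoleA adj vs = pvHoleB adj 0 vs ∧ pvHoleA (pvComp adj m) vs = pvHoleB adj 1 vs := by
      intro vs hsub hlen5
      have hnd : vs.Nodup := List.Nodup.sublist hsub hrangend
      refine ⟨pvHole_eq adj 0 adj vs hnd hlen5 ?_, pvHole_eq adj 1 (pvComp adj m) vs hnd hlen5 ?_⟩
      · intro v _ u _
        simp [pvEdge, pvRowB_eq]
      · intro v hv u hu
        exact pvCompEdge adj m hm0 v u (hbounds v (hsub.subset hv)) (hbounds u (hsub.subset hu))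
    have hFound : (([adj, pvComp adj m].any fun g =>
        (PySem.List.pyRange 5 (m+1) 2).any fun len =>
          (PySem.List.combinations (PySem.List.pyRange 0 m 1) len.toNat).any fun vs =>
            pvHoleA g vs) = true)
        ↔ (∃ vs, vs.Sublist (PySem.List.pyRange 0 m 1) ∧ 5 ≤ vs.length ∧ vs.length % 2 = 1 ∧
            (pvHoleB adj 0 vs = true ∨ pvHoleB adj 1 vs = true)) := by
      constructor
      · intro h
        simp only [List.any_eq_true] at h
        obtain ⟨g, hg, len, hlen, vs, hvs, hhole⟩ := h
        obtain ⟨hsub, hlenvs⟩ := (PySem.List.mem_combinations_iff _ _ _).mp hvs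
        have hmem := (PySem.List.mem_pyRange_iff_of_pos (by norm_num) len).mp hlen
        have h5 : 5 ≤ vs.length := by omega
        have hodd : vs.length % 2 = 1 := by
          obtain ⟨_, _, hd⟩ := hmem
          omega
        refine ⟨vs, hsub, h5, hodd, ?_⟩
        have hAB := holeAB vs hsub h5
        rcases (by simpa using hg : g = adj ∨ g = pvComp adj m) with rfl | rfl
        · exact Or.inl (hAB.1 ▸ hhole)
        · exact Or.inr (hAB.2 ▸ hhole)
      · rintro ⟨vs, hsub, h5, hodd, hh⟩
        simp only [List.any_eq_true]
        have hlenle : vs.length ≤ m.toNat := by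
          have h := hsub.length_le
          rw [PySem.List.length_pyRange_one] at h
          omega
        have hlenmem : ((vs.length : Int)) ∈ PySem.List.pyRange 5 (m+1) 2 := by
          rw [PySem.List.mem_pyRange_iff_of_pos (by norm_num)]
          refine ⟨by omega, by omega, by omega⟩
        have hcomb : vs ∈ PySem.List.combinations (PySem.List.pyRange 0 m 1)
            ((vs.length : Int)).toNat := by
          rw [PySem.List.mem_combinations_iff]
          exact ⟨hsub, by omega⟩
        have hAB := holeAB vs hsub h5
        rcases hh with hh | hh
        · exact ⟨adj, by simp, (vs.length : Int), hlenmem, vs, hcomb, hAB.1 ▸ hh⟩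
        · exact ⟨pvComp adj m, by simp, (vs.length : Int), hlenmem, vs, hcomb, hAB.2 ▸ hh⟩
    have hB : pvSearch adj [] m.toNat 0
        = (PySem.List.pyRange 0 m 1).sublists'.all (fun e => pvBase adj e) := by
      rw [pvSearch_eq adj m.toNat [] 0, pvIntRange_eq m.toNat 0]
      have h0 : (0 : Int) + (m.toNat : Int) = m := by omega
      rw [h0]
      simp
    rw [hB]
    by_cases hA : ([adj, pvComp adj m].any fun g =>
        (PySem.List.pyRange 5 (m+1) 2).any fun len =>
          (PySem.List.combinations (PySem.List.pyRange 0 m 1) len.toNat).any fun vs =>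
            pvHoleA g vs) = true
    · rw [if_pos hA]
      symm
      rw [List.all_eq_false]
      obtain ⟨vs, hsub, h5, hodd, hh⟩ := hFound.mp hA
      refine ⟨vs, List.mem_sublists'.mpr hsub, ?_⟩
      have hcond : 5 ≤ vs.length ∧ vs.length % 2 = 1 ∧
          (pvHoleB adj 0 vs || pvHoleB adj 1 vs) = true := by
        exact ⟨h5, hodd, (Bool.or_eq_true _ _).mpr hh⟩
      unfold pvBase
      rw [if_pos hcond]
      simp
    · rw [if_neg hA]
      symm
      rw [List.all_eq_true]
      intro e he
      have hsub := List.mem_sublists'.mp he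
      have hcond : ¬(5 ≤ e.length ∧ e.length % 2 = 1 ∧
          (pvHoleB adj 0 e || pvHoleB adj 1 e) = true) := by
        rintro ⟨h5, hodd, hor⟩
        exact hA (hFound.mpr ⟨e, hsub, h5, hodd, (Bool.or_eq_true _ _).mp hor⟩)
      unfold pvBase
      rw [if_neg hcond]

-- ===== VERDICT (by name: the statement is the Claim_ definition above) =====
theorem is_perfect_check_spec : Claim_equal_is_perfect_check := by
  intro adj m _ _
  unfold Spec_is_perfect_check
  exact pv_main adj m
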